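-- pv_equiv track=rewrite | github.com/alex-khod/rom2py | src/formats/registry.py | _inherit_parents
-- ===== SOURCE A (Python) =====
-- def _inherit_parents(records: dict):
--     records = {k: v.copy() for k, v in records.items()}
--     for rid, record in records.items():
--         parent = record
--         while 'parent' in parent:
--             parent = records[parent['parent']]
--         for field in parent.keys():
--             if field not in record:
--                 record[field] = parent[field]
--         records[rid] = record
--     return records
-- ===== SOURCE B (Python) =====
-- def _inherit_parents(records: dict):
--     # Memoize each record's root-ancestor id (with path compression) and build a
--     # fresh output dict from the untouched input, instead of rewalking full
--     # parent chains through an evolving dict.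
--     roots = {}
--
--     def find_root(rid):
--         chain = []
--         cur = rid
--         while cur not in roots and 'parent' in records[cur]:
--             chain.append(cur)
--             cur = records[cur]['parent']
--         root = roots.get(cur, cur)
--         for c in chain:
--             roots[c] = root
--         return root
--
--     out = {}
--     for rid, rec in records.items():
--         root_rec = records[find_root(rid)]
--         new = dict(rec)
--         for f, v in root_rec.items():
--             if f not in new:
--                 new[f] = v
--         out[rid] = new
--     return out
-- ===== Notes on version B (the rewrite author's own statement) =====
-- stated objective: alternative
-- what changed: B resolves each record's root-ancestor id once via a memo table with path compression over the untouched input dict and builds a fresh output dict, instead of A's rewalking every full parent chain through the dict it is mutating in place.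
import Mathlib
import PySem

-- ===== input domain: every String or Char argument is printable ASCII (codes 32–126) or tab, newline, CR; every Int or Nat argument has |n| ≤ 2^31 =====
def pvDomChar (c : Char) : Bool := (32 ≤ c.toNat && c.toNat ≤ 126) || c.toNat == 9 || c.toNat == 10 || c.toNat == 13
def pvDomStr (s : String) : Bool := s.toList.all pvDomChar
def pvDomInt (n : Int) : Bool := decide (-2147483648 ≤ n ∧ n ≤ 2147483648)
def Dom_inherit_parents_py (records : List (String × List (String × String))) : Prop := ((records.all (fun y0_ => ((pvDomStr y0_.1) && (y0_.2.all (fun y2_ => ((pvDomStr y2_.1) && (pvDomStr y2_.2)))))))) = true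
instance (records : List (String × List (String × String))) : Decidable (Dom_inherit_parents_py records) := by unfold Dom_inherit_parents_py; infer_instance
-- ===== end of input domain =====

-- B resolves each root-ancestor id once via a memo table (path compression) over the static input,
-- instead of A's rewalking of every full parent chain through the dict it mutates in place.
-- Python A mutates its local dict copy only; the caller's argument is untouched by both.


-- ===== PORT A =====
-- `records = {k: v.copy() for k, v in records.items()}` — both Pythons read their argument as a dict of dicts (shared helper)
def pvNorm (records : List (String × List (String × String))) :
    PySem.Dict String (PySem.Dict String String) :=
  PySem.Dict.ofList (records.map (fun p => (p.1, PySem.Dict.ofList p.2)))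

-- `for field in parent.keys(): if field not in record: record[field] = parent[field]` —
-- this merge loop is verbatim identical in A and in B (`for f, v in root_rec.items(): if f not in new: new[f] = v`), shared helper
def pvMerge (record parent : PySem.Dict String String) : PySem.Dict String String :=
  parent.items.foldl (fun r fv => if r.contains fv.1 then r else r.insert fv.1 fv.2) record

-- A's `while 'parent' in parent: parent = records[parent['parent']]`, fuel-bounded; Pre_ guarantees the
-- fuel `size+1` suffices and that every `records[...]` lookup succeeds (so `getD` never sees its default)
def pvAWalk (d : PySem.Dict String (PySem.Dict String String)) :
    Nat → PySem.Dict String String → PySem.Dict String String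
  | 0, parent => parent
  | fuel+1, parent =>
    match parent.get? "parent" with
    | none => parent
    | some p => pvAWalk d fuel (d.getD p PySem.Dict.empty)

-- A's main loop `for rid, record in records.items(): ... records[rid] = record` — the walk reads the EVOLVING dict
def pvALoop (fuel : Nat) :
    List String → PySem.Dict String (PySem.Dict String String) → PySem.Dict String (PySem.Dict String String)
  | [], d => d
  | rid :: rest, d =>
    let record := d.getD rid PySem.Dict.empty
    let record' := pvMerge record (pvAWalk d fuel record)
    pvALoop fuel rest (d.insert rid record')

def inherit_parents_py (records : List (String × List (String × String))) :
    List (String × List (String × String)) :=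
  let d := pvNorm records
  (pvALoop (d.size + 1) d.keys d).items.map (fun p => (p.1, p.2.items))

-- ===== PORT B =====
-- B's `while cur not in roots and 'parent' in records[cur]: chain.append(cur); cur = records[cur]['parent']`
def pvBWalk (d : PySem.Dict String (PySem.Dict String String)) :
    Nat → PySem.Dict String String → String → List String → String × List String
  | 0, _, cur, chain => (cur, chain)
  | fuel+1, roots, cur, chain =>
    if !roots.contains cur && (d.getD cur PySem.Dict.empty).contains "parent" then
      pvBWalk d fuel roots ((d.getD cur PySem.Dict.empty).getD "parent" "") (chain ++ [cur])
    else (cur, chain)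

-- B's `find_root`: root id plus the memo table extended along the walked chain (path compression)
def pvBFind (d : PySem.Dict String (PySem.Dict String String)) (fuel : Nat)
    (roots : PySem.Dict String String) (rid : String) : String × PySem.Dict String String :=
  let wc := pvBWalk d fuel roots rid []
  let root := roots.getD wc.1 wc.1
  (root, wc.2.foldl (fun m c => m.insert c root) roots)

-- B's main loop: reads only the STATIC input dict, threads the memo table, builds a fresh `out` dict
def pvBLoop (d : PySem.Dict String (PySem.Dict String String)) (fuel : Nat) :
    List (String × PySem.Dict String String) → PySem.Dict String String →
    PySem.Dict String (PySem.Dict String String) → PySem.Dict String (PySem.Dict String String)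
  | [], _, out => out
  | (rid, rec) :: rest, roots, out =>
    let fr := pvBFind d fuel roots rid
    pvBLoop d fuel rest fr.2 (out.insert rid (pvMerge rec (d.getD fr.1 PySem.Dict.empty)))

def inherit_parents_py_alt (records : List (String × List (String × String))) :
    List (String × List (String × String)) :=
  let d := pvNorm records
  (pvBLoop d (d.size + 1) d.items PySem.Dict.empty PySem.Dict.empty).items.map
    (fun p => (p.1, p.2.items))

-- ===== PRECONDITION & SPEC =====
-- Follows the parent pointers of the INPUT graph only: `some root` iff, within `fuel` steps, every visited
-- parent id is a key of the dict and a record without a 'parent' field is reached.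
def pvRootId? (d : PySem.Dict String (PySem.Dict String String)) :
    Nat → String → Option String
  | 0, _ => none
  | fuel+1, cur =>
    match (d.getD cur PySem.Dict.empty).get? "parent" with
    | none => some cur
    | some p => if d.contains p then pvRootId? d fuel p else none

-- Pre_: the 'parent' pointer graph of the input is total and acyclic — every parent chain stays inside the
-- dict and reaches a record without a 'parent' field within size+1 hops (a terminating chain never repeats a
-- key, so size+1 hops are enough: the bound is no restriction). This is a property of the input graph alone —
-- pvRootId? above follows one String field per hop and computes none of the ports' field-merging — and it is
-- exactly where Python A returns: on a missing parent id A raises KeyError, on a cycle A loops forever.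
def Pre_inherit_parents_py (records : List (String × List (String × String))) : Prop :=
  ∀ k ∈ (pvNorm records).keys,
    (pvRootId? (pvNorm records) ((pvNorm records).size + 1) k).isSome = true
instance (records : List (String × List (String × String))) : Decidable (Pre_inherit_parents_py records) := by unfold Pre_inherit_parents_py; infer_instance

def pvWitness_inherit_parents_py : (List (String × List (String × String))) :=
  [("a", [("x", "1")]), ("b", [("parent", "a"), ("y", "2")])]

def Spec_inherit_parents_py (records : List (String × List (String × String))) (out : List (String × List (String × String))) : Prop := out = inherit_parents_py_alt records
instance (records : List (String × List (String × String))) (out : List (String × List (String × String))) : Decidable (Spec_inherit_parents_py records out) := by unfold Spec_inherit_parents_py; infer_instance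

-- ===== CLAIM (what is proved, stated in full; the proofs are below) =====
def Claim_equal_inherit_parents_py : Prop := ∀ (records : List (String × List (String × String))), Dom_inherit_parents_py records → Pre_inherit_parents_py records → Spec_inherit_parents_py records (inherit_parents_py records)

-- ===== LEMMAS AND PROOFS =====
-- the per-record result both loops compute: the record merged with its root ancestor's fields
def pvSpecVal (d : PySem.Dict String (PySem.Dict String String)) (fuel : Nat) (k : String) :
    PySem.Dict String String :=
  match pvRootId? d fuel k with
  | some r => pvMerge (d.getD k PySem.Dict.empty) (d.getD r PySem.Dict.empty)
  | none => d.getD k PySem.Dict.empty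

theorem pvRootId_mono (d : PySem.Dict String (PySem.Dict String String)) :
    ∀ (f g : Nat) (cur r : String), f ≤ g → pvRootId? d f cur = some r → pvRootId? d g cur = some r := by
  intro f
  induction f with
  | zero => intro g cur r _ h; simp [pvRootId?] at h
  | succ f ih =>
    intro g cur r hle h
    obtain ⟨g, rfl⟩ : ∃ g', g = g' + 1 := ⟨g - 1, by omega⟩
    simp only [pvRootId?] at h ⊢
    cases hp : (d.getD cur PySem.Dict.empty).get? "parent" with
    | none => simp only [hp] at h ⊢; exact h
    | some p =>
      simp only [hp] at h ⊢
      by_cases hc : d.contains p = true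
      · simp only [hc, if_true] at h ⊢
        exact ih g p r (by omega) h
      · simp only [Bool.not_eq_true] at hc
        simp [hc] at h

theorem pvRootId_det (d : PySem.Dict String (PySem.Dict String String))
    {f g : Nat} {cur r r' : String} (h : pvRootId? d f cur = some r)
    (h' : pvRootId? d g cur = some r') : r = r' := by
  have h1 := pvRootId_mono d f (max f g) cur r (le_max_left _ _) h
  have h2 := pvRootId_mono d g (max f g) cur r' (le_max_right _ _) h'
  rw [h1] at h2; exact (Option.some.injEq _ _ ▸ h2)

theorem pvRootId_no_parent (d : PySem.Dict String (PySem.Dict String String)) :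
    ∀ (f : Nat) (cur r : String), pvRootId? d f cur = some r →
      (d.getD r PySem.Dict.empty).get? "parent" = none := by
  intro f
  induction f with
  | zero => intro cur r h; simp [pvRootId?] at h
  | succ f ih =>
    intro cur r h
    simp only [pvRootId?] at h
    cases hp : (d.getD cur PySem.Dict.empty).get? "parent" with
    | none => simp only [hp] at h; obtain rfl : cur = r := by simpa using h
              exact hp
    | some p =>
      simp only [hp] at h
      by_cases hc : d.contains p = true
      · simp only [hc, if_true] at h; exact ih p r h
      · simp only [Bool.not_eq_true] at hc; simp [hc] at h

theorem pvFoldl_get?_ne (k : String) :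
    ∀ (l : List (String × String)) (rec : PySem.Dict String String),
      (∀ fv ∈ l, fv.1 ≠ k) →
      (l.foldl (fun r fv => if r.contains fv.1 then r else r.insert fv.1 fv.2) rec).get? k = rec.get? k := by
  intro l
  induction l with
  | nil => intro rec _; rfl
  | cons fv rest ih =>
    intro rec hne
    simp only [List.foldl_cons]
    rw [ih _ (fun x hx => hne x (List.mem_cons_of_mem _ hx))]
    by_cases hc : rec.contains fv.1 = true
    · simp [hc]
    · simp only [Bool.not_eq_true] at hc
      simp [hc, PySem.Dict.get?_insert, Ne.symm (hne fv (List.mem_cons_self))]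

theorem pvMerge_get?_parent (rec parent : PySem.Dict String String)
    (h : parent.get? "parent" = none) :
    (pvMerge rec parent).get? "parent" = rec.get? "parent" := by
  apply pvFoldl_get?_ne
  intro fv hfv heq
  have hk : fv.1 ∈ parent.keys := PySem.Dict.mem_keys_of_mem_items _ hfv
  have := (PySem.Dict.get?_eq_none_iff_contains parent "parent").mp h
  rw [heq] at hk
  exact absurd ((PySem.Dict.contains_iff_mem_keys parent "parent").mpr hk) (by simp [this])

theorem pvMerge_self_of_contains :
    ∀ (l : List (String × String)) (rec : PySem.Dict String String),
      (∀ fv ∈ l, rec.contains fv.1 = true) →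
      (l.foldl (fun r fv => if r.contains fv.1 then r else r.insert fv.1 fv.2) rec) = rec := by
  intro l
  induction l with
  | nil => intro rec _; rfl
  | cons fv rest ih =>
    intro rec h
    simp only [List.foldl_cons, h fv (List.mem_cons_self), if_true]
    exact ih rec (fun x hx => h x (List.mem_cons_of_mem _ hx))

theorem pvMerge_self (rec : PySem.Dict String String) : pvMerge rec rec = rec := by
  apply pvMerge_self_of_contains
  intro fv hfv
  exact (PySem.Dict.contains_iff_mem_keys rec fv.1).mpr
    (PySem.Dict.mem_keys_of_mem_items _ hfv)

theorem pvAWalk_eq (d d' : PySem.Dict String (PySem.Dict String String))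
    (hview : ∀ k, (d'.getD k PySem.Dict.empty).get? "parent" = (d.getD k PySem.Dict.empty).get? "parent")
    (hroot : ∀ k, (d.getD k PySem.Dict.empty).get? "parent" = none →
        d'.getD k PySem.Dict.empty = d.getD k PySem.Dict.empty) :
    ∀ (f : Nat) (cur r : String), pvRootId? d f cur = some r →
      pvAWalk d' f (d'.getD cur PySem.Dict.empty) = d.getD r PySem.Dict.empty := by
  intro f
  induction f with
  | zero => intro cur r h; simp [pvRootId?] at h
  | succ f ih =>
    intro cur r h
    simp only [pvRootId?] at h
    simp only [pvAWalk]
    cases hp : (d.getD cur PySem.Dict.empty).get? "parent" with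
    | none =>
      simp only [hp] at h
      obtain rfl : cur = r := by simpa using h
      rw [hview cur, hp, hroot cur hp]
    | some p =>
      simp only [hp] at h
      by_cases hc : d.contains p = true
      · simp only [hc, if_true] at h
        rw [hview cur, hp]
        exact ih p r h
      · simp only [Bool.not_eq_true] at hc; simp [hc] at h

theorem pvALoop_spec (d : PySem.Dict String (PySem.Dict String String)) (F : Nat) (hF : 0 < F)
    (hpre : ∀ k ∈ d.keys, (pvRootId? d F k).isSome = true) :
    ∀ (rest : List String) (d' : PySem.Dict String (PySem.Dict String String)),
      rest.Nodup → (∀ k ∈ rest, k ∈ d.keys) →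
      d'.keys = d.keys →
      (∀ k ∈ rest, d'.getD k PySem.Dict.empty = d.getD k PySem.Dict.empty) →
      (∀ k, (d'.getD k PySem.Dict.empty).get? "parent" = (d.getD k PySem.Dict.empty).get? "parent") →
      (∀ k, (d.getD k PySem.Dict.empty).get? "parent" = none →
          d'.getD k PySem.Dict.empty = d.getD k PySem.Dict.empty) →
      (pvALoop F rest d').keys = d.keys ∧
      (∀ k, (pvALoop F rest d').getD k PySem.Dict.empty =
        if k ∈ rest then pvSpecVal d F k else d'.getD k PySem.Dict.empty) := by
  intro rest
  induction rest with
  | nil => intro d' _ _ hkeys _ _ _; exact ⟨hkeys, by simp [pvALoop]⟩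
  | cons rid rest ih =>
    intro d' hnd hsub hkeys hrest hview hroot
    have hridk : rid ∈ d.keys := hsub rid (List.mem_cons_self)
    obtain ⟨r, hr⟩ : ∃ r, pvRootId? d F rid = some r := by
      have := hpre rid hridk; exact Option.isSome_iff_exists.mp this
    have hrec : d'.getD rid PySem.Dict.empty = d.getD rid PySem.Dict.empty :=
      hrest rid (List.mem_cons_self)
    have hwalk : pvAWalk d' F (d'.getD rid PySem.Dict.empty) = d.getD r PySem.Dict.empty :=
      pvAWalk_eq d d' hview hroot F rid r hr
    have hrnp : (d.getD r PySem.Dict.empty).get? "parent" = none :=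
      pvRootId_no_parent d F rid r hr
    -- the merged record
    have hval : pvMerge (d'.getD rid PySem.Dict.empty) (pvAWalk d' F (d'.getD rid PySem.Dict.empty))
        = pvSpecVal d F rid := by
      rw [hwalk, hrec, pvSpecVal, hr]
    simp only [pvALoop]
    set v := pvMerge (d'.getD rid PySem.Dict.empty) (pvAWalk d' F (d'.getD rid PySem.Dict.empty)) with hv
    have hcont : d'.contains rid = true :=
      (PySem.Dict.contains_iff_mem_keys d' rid).mpr (hkeys ▸ hridk)
    have hkeys' : (d'.insert rid v).keys = d.keys := by
      rw [PySem.Dict.keys_insert_of_contains d' v hcont, hkeys]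
    have hgetins : ∀ k, (d'.insert rid v).getD k PySem.Dict.empty =
        if k = rid then v else d'.getD k PySem.Dict.empty := by
      intro k; exact PySem.Dict.getD_insert d' rid k v PySem.Dict.empty
    have hview' : ∀ k, ((d'.insert rid v).getD k PySem.Dict.empty).get? "parent" =
        (d.getD k PySem.Dict.empty).get? "parent" := by
      intro k; rw [hgetins k]
      by_cases hk : k = rid
      · subst hk
        simp only [if_true]
        rw [hv, pvMerge_get?_parent _ _ (hwalk ▸ hrnp), hrec]
      · simp only [hk, if_false]; exact hview k
    have hroot' : ∀ k, (d.getD k PySem.Dict.empty).get? "parent" = none →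
        (d'.insert rid v).getD k PySem.Dict.empty = d.getD k PySem.Dict.empty := by
      intro k hk
      rw [hgetins k]
      by_cases hkr : k = rid
      · rw [hkr] at hk ⊢
        simp only
        -- rid itself has no parent: its root is itself, merge with itself is identity
        have hrid : pvRootId? d F rid = some rid := by
          obtain ⟨F', rfl⟩ : ∃ F', F = F' + 1 := ⟨F - 1, by omega⟩
          simp [pvRootId?, hk]
        obtain rfl : r = rid := pvRootId_det d hr hrid
        rw [hv, hwalk, hrec, pvMerge_self]
        simp
      · simp only [hkr, if_false]; exact hroot k hk
    have hrest' : ∀ k ∈ rest, (d'.insert rid v).getD k PySem.Dict.empty = d.getD k PySem.Dict.empty := by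
      intro k hkm
      rw [hgetins k]
      have : k ≠ rid := by rintro rfl; exact (List.nodup_cons.mp hnd).1 hkm
      simp only [this, if_false]
      exact hrest k (List.mem_cons_of_mem _ hkm)
    obtain ⟨hK, hV⟩ := ih (d'.insert rid v) (List.nodup_cons.mp hnd).2
      (fun k hk => hsub k (List.mem_cons_of_mem _ hk)) hkeys' hrest' hview' hroot'
    refine ⟨hK, ?_⟩
    intro k
    rw [hV k]
    by_cases hk : k ∈ rest
    · simp [hk]
    · simp only [hk, if_false]
      rw [hgetins k]
      by_cases hkr : k = rid
      · subst hkr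
        simp only [if_true, List.mem_cons, true_or, if_true]
        rw [hv] at *; exact hval
      · simp [hkr, hk]

-- B-side: the memo table only ever holds correct root ids
def pvMInv (d : PySem.Dict String (PySem.Dict String String)) (F : Nat)
    (roots : PySem.Dict String String) : Prop :=
  ∀ k r', roots.get? k = some r' → pvRootId? d F k = some r'

theorem pvBWalk_spec (d : PySem.Dict String (PySem.Dict String String)) (F : Nat)
    (roots : PySem.Dict String String) (hM : pvMInv d F roots) :
    ∀ (f : Nat), f ≤ F → ∀ (cur : String) (chain : List String) (r : String),
      pvRootId? d f cur = some r →
      roots.getD (pvBWalk d f roots cur chain).1 (pvBWalk d f roots cur chain).1 = r ∧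
      (∀ c ∈ (pvBWalk d f roots cur chain).2, c ∈ chain ∨ pvRootId? d F c = some r) := by
  intro f
  induction f with
  | zero => intro _ cur chain r h; simp [pvRootId?] at h
  | succ f ih =>
    intro hf cur chain r h
    simp only [pvBWalk]
    by_cases hcont : roots.contains cur = true
    · -- memoized: stop here
      simp only [hcont, Bool.not_true, Bool.false_and, Bool.false_eq_true, if_false]
      obtain ⟨r0, hr0⟩ : ∃ r0, roots.get? cur = some r0 := by
        rcases hg : roots.get? cur with _ | r0
        · exact absurd ((PySem.Dict.get?_eq_none_iff_contains roots cur).mp hg) (by simp [hcont])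
        · exact ⟨r0, rfl⟩
      have := hM cur r0 hr0
      obtain rfl : r0 = r := pvRootId_det d this h
      exact ⟨PySem.Dict.getD_of_get?_eq_some roots cur hr0, fun c hc => Or.inl hc⟩
    · simp only [Bool.not_eq_true] at hcont
      by_cases hpar : (d.getD cur PySem.Dict.empty).contains "parent" = true
      · -- step to the parent
        simp only [hcont, hpar, Bool.not_false, Bool.true_and]
        obtain ⟨p, hp⟩ : ∃ p, (d.getD cur PySem.Dict.empty).get? "parent" = some p := by
          rcases hg : (d.getD cur PySem.Dict.empty).get? "parent" with _ | p
          · exact absurd ((PySem.Dict.get?_eq_none_iff_contains _ _).mp hg) (by simp [hpar])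
          · exact ⟨p, rfl⟩
        simp only [pvRootId?, hp] at h
        have hcp : d.contains p = true := by
          by_contra hc; simp only [Bool.not_eq_true] at hc; simp [hc] at h
        simp only [hcp, if_true] at h
        rw [PySem.Dict.getD_of_get?_eq_some _ _ hp]
        obtain ⟨h1, h2⟩ := ih (by omega) p (chain ++ [cur]) r h
        refine ⟨h1, fun c hc => ?_⟩
        rcases h2 c hc with hmem | hrt
        · rcases List.mem_append.mp hmem with hmem | hmem
          · exact Or.inl hmem
          · obtain rfl : c = cur := by simpa using hmem
            have hcur : pvRootId? d (f+1) c = some r := by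
              simp [pvRootId?, hp, hcp, h]
            exact Or.inr (pvRootId_mono d (f+1) F c r hf hcur)
        · exact Or.inr hrt
      · -- root reached (not memoized, no parent)
        simp only [Bool.not_eq_true] at hpar
        simp only [hpar, Bool.and_false, Bool.false_eq_true, if_false]
        have hnone : (d.getD cur PySem.Dict.empty).get? "parent" = none :=
          (PySem.Dict.get?_eq_none_iff_contains _ _).mpr hpar
        simp only [pvRootId?, hnone] at h
        obtain rfl : cur = r := by simpa using h
        exact ⟨PySem.Dict.getD_of_not_contains roots cur hcont, fun c hc => Or.inl hc⟩

theorem pvMInv_foldl (d : PySem.Dict String (PySem.Dict String String)) (F : Nat) (r : String) :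
    ∀ (l : List String) (m : PySem.Dict String String), pvMInv d F m →
      (∀ c ∈ l, pvRootId? d F c = some r) →
      pvMInv d F (l.foldl (fun m c => m.insert c r) m) := by
  intro l
  induction l with
  | nil => intro m hm _; exact hm
  | cons c rest ih =>
    intro m hm hl
    simp only [List.foldl_cons]
    refine ih _ ?_ (fun x hx => hl x (List.mem_cons_of_mem _ hx))
    intro k r' hk
    rw [PySem.Dict.get?_insert] at hk
    by_cases hkc : k = c
    · simp only [hkc, if_true] at hk
      obtain rfl : r = r' := by simpa using hk
      exact hkc ▸ hl c (List.mem_cons_self)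
    · simp only [hkc, if_false] at hk
      exact hm k r' hk

theorem pvBFind_spec (d : PySem.Dict String (PySem.Dict String String)) (F : Nat)
    (roots : PySem.Dict String String) (rid r : String) (hM : pvMInv d F roots)
    (hr : pvRootId? d F rid = some r) :
    (pvBFind d F roots rid).1 = r ∧ pvMInv d F (pvBFind d F roots rid).2 := by
  obtain ⟨h1, h2⟩ := pvBWalk_spec d F roots hM F le_rfl rid [] r hr
  constructor
  · simp only [pvBFind]; exact h1
  · simp only [pvBFind, h1]
    refine pvMInv_foldl d F r _ _ hM ?_
    intro c hc
    rcases h2 c hc with hmem | hrt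
    · simp at hmem
    · exact hrt

theorem pvBLoop_spec (d : PySem.Dict String (PySem.Dict String String)) (F : Nat)
    (hpre : ∀ k ∈ d.keys, (pvRootId? d F k).isSome = true) :
    ∀ (l : List (String × PySem.Dict String String)) (roots : PySem.Dict String String)
      (out : PySem.Dict String (PySem.Dict String String)),
      pvMInv d F roots →
      (∀ p ∈ l, p.1 ∈ d.keys) →
      (∀ p ∈ l, p.2 = d.getD p.1 PySem.Dict.empty) →
      (∀ p ∈ l, out.contains p.1 = false) →
      (l.map Prod.fst).Nodup →
      (pvBLoop d F l roots out).items =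
        out.items ++ l.map (fun p => (p.1, pvSpecVal d F p.1)) := by
  intro l
  induction l with
  | nil => intro roots out _ _ _ _ _; simp [pvBLoop]
  | cons hd rest ih =>
    obtain ⟨rid, rec⟩ := hd
    intro roots out hM hkeys hvals hfresh hnd
    obtain ⟨r, hr⟩ : ∃ r, pvRootId? d F rid = some r :=
      Option.isSome_iff_exists.mp (hpre rid (hkeys (rid, rec) (List.mem_cons_self)))
    obtain ⟨h1, h2⟩ := pvBFind_spec d F roots rid r hM hr
    simp only [pvBLoop, h1]
    have hvaleq : pvMerge rec (d.getD r PySem.Dict.empty) = pvSpecVal d F rid := by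
      have hv2 : rec = d.getD rid PySem.Dict.empty := hvals (rid, rec) (List.mem_cons_self)
      rw [hv2, pvSpecVal, hr]
    have hout : (out.insert rid (pvMerge rec (d.getD r PySem.Dict.empty))).items =
        out.items ++ [(rid, pvSpecVal d F rid)] := by
      rw [PySem.Dict.items_insert_of_not_contains out _ (hfresh (rid, rec) (List.mem_cons_self)),
        hvaleq]
    have hfresh' : ∀ p ∈ rest,
        (out.insert rid (pvMerge rec (d.getD r PySem.Dict.empty))).contains p.1 = false := by
      intro p hp
      rw [PySem.Dict.contains_insert]
      have hne : p.1 ≠ rid := by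
        intro he
        have hmem : rid ∈ List.map Prod.fst rest := by
          rw [← he]; exact List.mem_map_of_mem hp
        exact (by simpa using hnd : rid ∉ List.map Prod.fst rest ∧ _).1 hmem
      simp [hne, hfresh p (List.mem_cons_of_mem _ hp)]
    rw [ih _ _ h2 (fun p hp => hkeys p (List.mem_cons_of_mem _ hp))
      (fun p hp => hvals p (List.mem_cons_of_mem _ hp)) hfresh' (List.nodup_cons.mp hnd).2,
      hout, List.append_assoc]
    simp

theorem inherit_parents_py_spec' (records : List (String × List (String × String)))
    (hpre : Pre_inherit_parents_py records) :
    inherit_parents_py records = inherit_parents_py_alt records := by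
  unfold inherit_parents_py inherit_parents_py_alt
  dsimp only
  set d := pvNorm records with hd
  set F := d.size + 1 with hF
  have hpre' : ∀ k ∈ d.keys, (pvRootId? d F k).isSome = true := hpre
  have hnd : d.keys.Nodup := PySem.Dict.nodup_keys_ofList _
  -- A's loop result, item by item
  obtain ⟨hK, hV⟩ := pvALoop_spec d F (by omega) hpre' d.keys d hnd (fun k hk => hk) rfl
    (fun k _ => rfl) (fun k => rfl) (fun k _ => rfl)
  have hitemsA : (pvALoop F d.keys d).items = d.keys.map (fun k => (k, pvSpecVal d F k)) := by
    rw [PySem.Dict.items_eq_map_keys _ (by rw [hK]; exact hnd) PySem.Dict.empty, hK]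
    refine List.map_congr_left ?_
    intro k hk
    rw [hV k, if_pos hk]
  -- B's loop result, item by item
  have hmapfst : List.map Prod.fst d.items = d.keys := by simp [PySem.Dict.keys]
  have hitemsB : (pvBLoop d F d.items PySem.Dict.empty PySem.Dict.empty).items =
      d.items.map (fun p => (p.1, pvSpecVal d F p.1)) := by
    rw [pvBLoop_spec d F hpre' d.items PySem.Dict.empty PySem.Dict.empty
      (fun k r' h => by rw [PySem.Dict.get?_empty] at h; cases h)
      (fun p hp => PySem.Dict.mem_keys_of_mem_items _ hp)
      (fun p hp => (PySem.Dict.getD_of_mem_items _ hp hnd _).symm)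
      (fun p _ => PySem.Dict.contains_empty _)
      (hmapfst ▸ hnd)]
    rfl
  rw [hitemsA, hitemsB, PySem.Dict.items_eq_map_keys d hnd PySem.Dict.empty, List.map_map,
    List.map_map, List.map_map]
  rfl

-- ===== VERDICT (by name: the statement is the Claim_ definition above) =====
theorem inherit_parents_py_spec : Claim_equal_inherit_parents_py := by
  intro records _ hpre
  exact inherit_parents_py_spec' records hpre
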